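-- pv_equiv track=rewrite | github.com/Fatey96/Sakura-dev | stix_generator/core/relationship_generator.py | _generate_threat_scenario
-- ===== SOURCE A (Python) =====
-- from typing import List, Dict, Any, Optional, Union
--
-- def _generate_threat_scenario(
--     objects: List[Dict[str, Any]], relationships: List[Dict[str, Any]]
-- ) -> str:
--     """
--     Generate a comprehensive threat scenario narrative.
--
--     Args:
--         objects: List of STIX objects
--         relationships: List of relationships
--
--     Returns:
--         Narrative describing the threat scenario
--     """
--     # Group objects by type
--     objects_by_type = {}
--     for obj in objects:
--         obj_type = obj['type']
--         if obj_type not in objects_by_type: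
--             objects_by_type[obj_type] = []
--         objects_by_type[obj_type].append(obj)
--
--     # Build scenario components
--     components = []
--
--     # Start with threat actors if present
--     if 'threat-actor' in objects_by_type:
--         actors = objects_by_type['threat-actor']
--         components.append(f"The threat landscape involves {len(actors)} threat actors, "
--                        f"including {', '.join(a.get('name', 'Unknown Actor') for a in actors)}.")
--
--     # Add campaign information
--     if 'campaign' in objects_by_type:
--         campaigns = objects_by_type['campaign']
--         components.append(f"These actors are involved in {len(campaigns)} campaigns, "
--                        f"notably {', '.join(c.get('name', 'Unknown Campaign') for c in campaigns)}.")
--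
--     # Describe tools and malware
--     tools_malware = []
--     if 'tool' in objects_by_type:
--         tools_malware.extend(objects_by_type['tool'])
--     if 'malware' in objects_by_type:
--         tools_malware.extend(objects_by_type['malware'])
--     if tools_malware:
--         components.append(f"The adversaries utilize various tools and malware, including "
--                        f"{', '.join(t.get('name', 'Unknown Tool') for t in tools_malware)}.")
--
--     # Add attack patterns
--     if 'attack-pattern' in objects_by_type:
--         attack_patterns = objects_by_type['attack-pattern']
--         components.append(f"Common techniques employed include "
--                        f"{', '.join(a.get('name', 'Unknown Technique') for a in attack_patterns[:3])}.")
--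
--     # Add targeted identities
--     if 'identity' in objects_by_type:
--         identities = objects_by_type['identity']
--         components.append(f"The primary targets include "
--                        f"{', '.join(i.get('name', 'Unknown Identity') for i in identities[:3])}.")
--
--     # Add mitigation information
--     if 'course-of-action' in objects_by_type:
--         mitigations = objects_by_type['course-of-action']
--         components.append(f"Recommended mitigations include "
--                        f"{', '.join(m.get('name', 'Unknown Mitigation') for m in mitigations)}.")
--
--     # Describe indicators
--     if 'indicator' in objects_by_type:
--         indicators = objects_by_type['indicator']
--         components.append(f"The activity can be detected by monitoring for "
--                        f"{len(indicators)} indicators of compromise.")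
--
--     # Combine components into a coherent narrative
--     scenario = " ".join(components)
--     if not scenario:
--         scenario = "No comprehensive scenario could be generated from the available objects."
--
--     return scenario
-- ===== SOURCE B (Python) =====
-- def _generate_threat_scenario(objects, relationships):
--     """Category lists are computed by direct filters over the input; no grouping dict."""
--     actors = [o for o in objects if o['type'] == 'threat-actor']
--     campaigns = [o for o in objects if o['type'] == 'campaign']
--     tools_malware = ([o for o in objects if o['type'] == 'tool']
--                      + [o for o in objects if o['type'] == 'malware'])
--     attack_patterns = [o for o in objects if o['type'] == 'attack-pattern']
--     identities = [o for o in objects if o['type'] == 'identity']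
--     mitigations = [o for o in objects if o['type'] == 'course-of-action']
--     indicators = [o for o in objects if o['type'] == 'indicator']
--
--     def names(objs, default):
--         return ', '.join(o.get('name', default) for o in objs)
--
--     parts = []
--     if actors:
--         parts.append(f"The threat landscape involves {len(actors)} threat actors, "
--                      f"including {names(actors, 'Unknown Actor')}.")
--     if campaigns:
--         parts.append(f"These actors are involved in {len(campaigns)} campaigns, "
--                      f"notably {names(campaigns, 'Unknown Campaign')}.")
--     if tools_malware:
--         parts.append(f"The adversaries utilize various tools and malware, including "
--                      f"{names(tools_malware, 'Unknown Tool')}.")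
--     if attack_patterns:
--         parts.append(f"Common techniques employed include {names(attack_patterns[:3], 'Unknown Technique')}.")
--     if identities:
--         parts.append(f"The primary targets include {names(identities[:3], 'Unknown Identity')}.")
--     if mitigations:
--         parts.append(f"Recommended mitigations include {names(mitigations, 'Unknown Mitigation')}.")
--     if indicators:
--         parts.append(f"The activity can be detected by monitoring for "
--                      f"{len(indicators)} indicators of compromise.")
--
--     return " ".join(parts) or "No comprehensive scenario could be generated from the available objects."
-- ===== Notes on version B (the rewrite author's own statement) =====
-- stated objective: simpler
-- what changed: B drops A's grouping-dict pass entirely and computes each needed STIX-type category as a direct filter over the input list, keeping the same ordered sentence blocks and join/fallback.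
-- outside the precondition, e.g. on _generate_threat_scenario([{'name': 'x'}], []): A raises KeyError, B raises KeyError
import Mathlib
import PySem

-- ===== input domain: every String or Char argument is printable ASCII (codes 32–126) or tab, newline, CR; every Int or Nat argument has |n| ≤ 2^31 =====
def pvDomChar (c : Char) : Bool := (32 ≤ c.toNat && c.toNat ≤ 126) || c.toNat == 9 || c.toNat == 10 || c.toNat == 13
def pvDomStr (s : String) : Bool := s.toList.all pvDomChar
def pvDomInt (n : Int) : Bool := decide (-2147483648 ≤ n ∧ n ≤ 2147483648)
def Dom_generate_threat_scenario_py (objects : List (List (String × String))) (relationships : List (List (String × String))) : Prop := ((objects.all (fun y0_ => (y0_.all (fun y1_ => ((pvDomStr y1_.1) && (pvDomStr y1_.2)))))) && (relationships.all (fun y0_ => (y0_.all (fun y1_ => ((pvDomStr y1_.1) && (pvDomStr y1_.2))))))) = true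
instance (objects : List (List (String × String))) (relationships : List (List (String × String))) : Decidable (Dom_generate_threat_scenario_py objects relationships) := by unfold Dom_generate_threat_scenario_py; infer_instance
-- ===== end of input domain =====

-- B replaces A's grouping dict by one direct filter per needed STIX type (objective: simpler).

-- shared dict-access helpers (a Python dict argument is an assoc list; lookup = first match)
-- o[k]; Python raises KeyError when k is absent — those inputs are excluded by Pre_, here "" is returned
def pvGet (o : List (String × String)) (k : String) : String :=
  ((o.find? (fun p => p.1 == k)).map Prod.snd).getD ""
-- o.get(k, dflt)
def pvGetD (o : List (String × String)) (k dflt : String) : String :=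
  ((o.find? (fun p => p.1 == k)).map Prod.snd).getD dflt

-- ', '.join(o.get('name', dflt) for o in objs)  (identical generator expression in both Pythons)
def pvNames (objs : List (List (String × String))) (dflt : String) : String :=
  PySem.Str.join ", " (objs.map (fun o => pvGetD o "name" dflt))

-- ===== PORT A =====
def generate_threat_scenario_py (objects : List (List (String × String))) (relationships : List (List (String × String))) : String :=
  -- objects_by_type: 'if t not in d: d[t] = []' then 'd[t].append(obj)'  ==  d[t] = d.get(t, []) + [obj]
  let objects_by_type : PySem.Dict String (List (List (String × String))) :=
    objects.foldl (fun d obj => d.modify (pvGet obj "type") [] (fun l => l ++ [obj])) PySem.Dict.empty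
  let components : List String := []
  let components := if objects_by_type.contains "threat-actor" then
      let actors := objects_by_type.getD "threat-actor" []
      components ++ ["The threat landscape involves " ++ PySem.Int.toStr (actors.length : Int) ++
        " threat actors, including " ++ pvNames actors "Unknown Actor" ++ "."]
    else components
  let components := if objects_by_type.contains "campaign" then
      let campaigns := objects_by_type.getD "campaign" []
      components ++ ["These actors are involved in " ++ PySem.Int.toStr (campaigns.length : Int) ++
        " campaigns, notably " ++ pvNames campaigns "Unknown Campaign" ++ "."]
    else components
  let tools_malware : List (List (String × String)) := []
  let tools_malware := if objects_by_type.contains "tool" then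
      tools_malware ++ objects_by_type.getD "tool" [] else tools_malware
  let tools_malware := if objects_by_type.contains "malware" then
      tools_malware ++ objects_by_type.getD "malware" [] else tools_malware
  let components := if tools_malware.isEmpty then components else
      components ++ ["The adversaries utilize various tools and malware, including " ++
        pvNames tools_malware "Unknown Tool" ++ "."]
  let components := if objects_by_type.contains "attack-pattern" then
      let attack_patterns := objects_by_type.getD "attack-pattern" []
      components ++ ["Common techniques employed include " ++
        pvNames (PySem.List.slice attack_patterns none (some 3)) "Unknown Technique" ++ "."]
    else components
  let components := if objects_by_type.contains "identity" then
      let identities := objects_by_type.getD "identity" []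
      components ++ ["The primary targets include " ++
        pvNames (PySem.List.slice identities none (some 3)) "Unknown Identity" ++ "."]
    else components
  let components := if objects_by_type.contains "course-of-action" then
      let mitigations := objects_by_type.getD "course-of-action" []
      components ++ ["Recommended mitigations include " ++ pvNames mitigations "Unknown Mitigation" ++ "."]
    else components
  let components := if objects_by_type.contains "indicator" then
      let indicators := objects_by_type.getD "indicator" []
      components ++ ["The activity can be detected by monitoring for " ++
        PySem.Int.toStr (indicators.length : Int) ++ " indicators of compromise."]
    else components
  let scenario := PySem.Str.join " " components
  if scenario = "" then "No comprehensive scenario could be generated from the available objects."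
  else scenario

-- ===== PORT B =====
def generate_threat_scenario_py_alt (objects : List (List (String × String))) (relationships : List (List (String × String))) : String :=
  let actors := objects.filter (fun o => pvGet o "type" == "threat-actor")
  let campaigns := objects.filter (fun o => pvGet o "type" == "campaign")
  let tools_malware := objects.filter (fun o => pvGet o "type" == "tool") ++
                       objects.filter (fun o => pvGet o "type" == "malware")
  let attack_patterns := objects.filter (fun o => pvGet o "type" == "attack-pattern")
  let identities := objects.filter (fun o => pvGet o "type" == "identity")
  let mitigations := objects.filter (fun o => pvGet o "type" == "course-of-action")
  let indicators := objects.filter (fun o => pvGet o "type" == "indicator")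
  let parts : List String :=
    (if actors.isEmpty then [] else
      ["The threat landscape involves " ++ PySem.Int.toStr (actors.length : Int) ++
        " threat actors, including " ++ pvNames actors "Unknown Actor" ++ "."]) ++
    (if campaigns.isEmpty then [] else
      ["These actors are involved in " ++ PySem.Int.toStr (campaigns.length : Int) ++
        " campaigns, notably " ++ pvNames campaigns "Unknown Campaign" ++ "."]) ++
    (if tools_malware.isEmpty then [] else
      ["The adversaries utilize various tools and malware, including " ++
        pvNames tools_malware "Unknown Tool" ++ "."]) ++
    (if attack_patterns.isEmpty then [] else
      ["Common techniques employed include " ++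
        pvNames (PySem.List.slice attack_patterns none (some 3)) "Unknown Technique" ++ "."]) ++
    (if identities.isEmpty then [] else
      ["The primary targets include " ++
        pvNames (PySem.List.slice identities none (some 3)) "Unknown Identity" ++ "."]) ++
    (if mitigations.isEmpty then [] else
      ["Recommended mitigations include " ++ pvNames mitigations "Unknown Mitigation" ++ "."]) ++
    (if indicators.isEmpty then [] else
      ["The activity can be detected by monitoring for " ++
        PySem.Int.toStr (indicators.length : Int) ++ " indicators of compromise."])
  let s := PySem.Str.join " " parts
  if s = "" then "No comprehensive scenario could be generated from the available objects." else s

-- ===== PRECONDITION & SPEC =====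
-- Pre_ excludes exactly the inputs where some object lacks a 'type' key: there Python A (and B) raise KeyError.
def Pre_generate_threat_scenario_py (objects : List (List (String × String))) (relationships : List (List (String × String))) : Prop :=
  ∀ o ∈ objects, "type" ∈ o.map Prod.fst
instance (objects : List (List (String × String))) (relationships : List (List (String × String))) : Decidable (Pre_generate_threat_scenario_py objects relationships) := by unfold Pre_generate_threat_scenario_py; infer_instance

def pvWitness_generate_threat_scenario_py : (List (List (String × String))) × (List (List (String × String))) :=
  ([[("type", "threat-actor"), ("name", "APT1")], [("type", "indicator")]], [])

def Spec_generate_threat_scenario_py (objects : List (List (String × String))) (relationships : List (List (String × String))) (out : String) : Prop := out = generate_threat_scenario_py_alt objects relationships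
instance (objects : List (List (String × String))) (relationships : List (List (String × String))) (out : String) : Decidable (Spec_generate_threat_scenario_py objects relationships out) := by unfold Spec_generate_threat_scenario_py; infer_instance

-- ===== CLAIM (what is proved, stated in full; the proofs are below) =====
def Claim_equal_generate_threat_scenario_py : Prop := ∀ (objects : List (List (String × String))) (relationships : List (List (String × String))), Dom_generate_threat_scenario_py objects relationships → Pre_generate_threat_scenario_py objects relationships → Spec_generate_threat_scenario_py objects relationships (generate_threat_scenario_py objects relationships)

-- ===== LEMMAS AND PROOFS =====

-- the grouping loop's entry at c is exactly the filter of objects whose 'type' is c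
lemma grp_getD (objects : List (List (String × String))) (d : PySem.Dict String (List (List (String × String)))) (c : String) :
    (objects.foldl (fun d obj => d.modify (pvGet obj "type") [] (fun l => l ++ [obj])) d).getD c []
      = d.getD c [] ++ objects.filter (fun o => pvGet o "type" == c) := by
  induction objects generalizing d with
  | nil => simp
  | cons o t ih =>
    rw [List.foldl_cons, ih, PySem.Dict.getD_modify, List.filter_cons]
    by_cases h : c = pvGet o "type"
    · simp [← h, List.append_assoc]
    · have h' : (pvGet o "type" == c) = false := by
        simp [beq_eq_false_iff_ne]; exact fun hh => h hh.symm
      simp [h, h']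

-- the grouping loop contains c iff some object's 'type' is c
lemma grp_contains (objects : List (List (String × String))) (d : PySem.Dict String (List (List (String × String)))) (c : String) :
    (objects.foldl (fun d obj => d.modify (pvGet obj "type") [] (fun l => l ++ [obj])) d).contains c
      = (d.contains c || objects.any (fun o => pvGet o "type" == c)) := by
  induction objects generalizing d with
  | nil => simp
  | cons o t ih =>
    rw [List.foldl_cons, ih, PySem.Dict.contains_modify, List.any_cons]
    by_cases h : c = pvGet o "type"
    · simp [← h]
    · have h' : (c == pvGet o "type") = false := by simp [beq_eq_false_iff_ne, h]
      have h'' : (pvGet o "type" == c) = false := by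
        simp [beq_eq_false_iff_ne]; exact fun hh => h hh.symm
      rw [h', h'']
      simp

lemma any_eq_not_isEmpty_filter {α : Type} (l : List α) (p : α → Bool) :
    l.any p = !(l.filter p).isEmpty := by
  rw [Bool.eq_iff_iff]
  simp [List.isEmpty_eq_false_iff, List.filter_eq_nil_iff, List.any_eq_true]

-- A's 'if t in d: components.append(s)' equals B's conditional singleton, appended
lemma condA {α : Type} (l : List α) (p : α → Bool) (acc : List String) (s : String) :
    (if l.any p then acc ++ [s] else acc) = acc ++ (if (l.filter p).isEmpty then [] else [s]) := by
  rw [any_eq_not_isEmpty_filter l p]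
  cases h : (l.filter p).isEmpty <;> simp

lemma condA0 {α : Type} (l : List α) (p : α → Bool) (s : String) :
    (if l.any p then [s] else ([] : List String)) = (if (l.filter p).isEmpty then [] else [s]) := by
  rw [any_eq_not_isEmpty_filter l p]
  cases h : (l.filter p).isEmpty <;> simp

-- A's conditional 'tools_malware.extend(...)' equals the unconditional concatenation
lemma condExtend {α : Type} (l : List α) (p : α → Bool) (tm : List α) :
    (if l.any p then tm ++ l.filter p else tm) = tm ++ l.filter p := by
  cases h : l.any p <;> simp_all [List.any_eq_true, List.filter_eq_nil_iff]

lemma condExtend0 {α : Type} (l : List α) (p : α → Bool) :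
    (if l.any p then l.filter p else []) = l.filter p := by
  cases h : l.any p <;> simp_all [List.any_eq_true, List.filter_eq_nil_iff]

-- A's 'if tools_malware: components.append(s)' in B's conditional-singleton shape
lemma condTM {α : Type} (l : List α) (acc : List String) (s : String) :
    (if l.isEmpty then acc else acc ++ [s]) = acc ++ (if l.isEmpty then [] else [s]) := by
  cases h : l.isEmpty <;> simp

-- ===== VERDICT (by name: the statement is the Claim_ definition above) =====

theorem generate_threat_scenario_py_spec : Claim_equal_generate_threat_scenario_py := by
  intro objects relationships _ _
  unfold Spec_generate_threat_scenario_py generate_threat_scenario_py generate_threat_scenario_py_alt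
  simp only [grp_getD, grp_contains, PySem.Dict.getD_empty, PySem.Dict.contains_empty,
    Bool.false_or, List.nil_append, condA, condA0, condExtend, condExtend0, condTM]
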